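-- pv_equiv track=rewrite | github.com/FFTYYY/FitterLog | fitterlog_server_module/experiment/views/group_opt/ask_database.py | get_head_reorder
-- ===== SOURCE A (Python) =====
-- def get_head_reorder(heads , show_order):
-- 	'''将head重排序为config中保存的顺序'''
--
-- 	show_order = [x for x in show_order if x in heads] #按顺序挑出那些记录了的head
--
-- 	child_pos = [] #哪些head位置是需要重排序的
-- 	for i in range(len(heads)):
-- 		if heads[i] in show_order:
-- 			child_pos.append(i)
-- 	for i in range(len(child_pos)): #将这些位置替换成show_order
-- 		heads[child_pos[i]] = show_order[i]
--
-- 	return heads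
-- ===== SOURCE B (Python) =====
-- def get_head_reorder(heads, show_order):
--     '''Reorder heads into the order saved in the config.'''
--     present = set(heads)
--     in_order = set(show_order)
--     out = []
--     k = 0
--     for h in heads:
--         if h in in_order:
--             while show_order[k] not in present:
--                 k += 1
--             out.append(show_order[k])
--             k += 1
--         else:
--             out.append(h)
--     heads[:] = out
--     return heads
-- ===== Notes on version B (the rewrite author's own statement) =====
-- stated objective: faster
-- what changed: A pre-filters show_order with a linear 'x in heads' scan, collects matching positions into child_pos, then assigns in a second index loop; B builds no filtered list and no position list at all: it hashes heads and show_order into sets once and does a single two-pointer pass, advancing a cursor through the raw show_order past non-present entries whenever a head matches.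
import Mathlib
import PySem

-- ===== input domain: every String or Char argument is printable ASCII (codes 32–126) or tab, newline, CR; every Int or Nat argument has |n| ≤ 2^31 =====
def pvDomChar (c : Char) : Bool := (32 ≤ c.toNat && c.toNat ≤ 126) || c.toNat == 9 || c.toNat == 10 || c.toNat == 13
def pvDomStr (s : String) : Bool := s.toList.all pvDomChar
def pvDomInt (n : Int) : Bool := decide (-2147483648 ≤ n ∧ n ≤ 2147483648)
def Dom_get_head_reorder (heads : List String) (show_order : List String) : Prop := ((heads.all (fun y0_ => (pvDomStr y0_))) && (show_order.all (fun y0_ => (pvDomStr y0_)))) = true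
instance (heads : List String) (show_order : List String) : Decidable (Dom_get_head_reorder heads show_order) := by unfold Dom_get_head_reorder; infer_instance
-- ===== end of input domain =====

-- B replaces A's filter pass + child_pos list + second assignment loop by one two-pointer pass with
-- hash-set membership and a cursor into the raw show_order (objective: faster, hashing removes the
-- linear membership scans). Both Pythons mutate `heads` in place and return the same object; the
-- equivalence proved here is about the return value.

-- ===== PORT A =====
-- Loop indices i always satisfy i < heads.length resp. i < child_pos.length, and every element of
-- child_pos is < heads.length, so getD ""/0 and set are exact there; show_order'[i] can raise
-- IndexError in Python — exactly those inputs are excluded by Pre_ below.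
def get_head_reorder (heads : List String) (show_order : List String) : List String :=
  let so := show_order.filter (fun x => heads.contains x)
  let child_pos := (List.range heads.length).foldl
      (fun (acc : List Nat) i => if so.contains (heads.getD i "") then acc ++ [i] else acc) []
  (List.range child_pos.length).foldl
      (fun hs i => hs.set (child_pos.getD i 0) (so.getD i "")) heads

-- ===== PORT B =====
-- the `while show_order[k] not in present: k += 1` cursor advance; the k < length guard only makes
-- the recursion total — Python raises IndexError exactly when it is reached with k = length, and
-- those inputs are outside Pre_ (getD then yields "", never used inside Pre_).
def skipB (present : PySem.Set String) (show_order : List String) (k : Nat) : Nat :=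
  if _h : k < show_order.length then
    if present.contains (show_order.getD k "") then k else skipB present show_order (k + 1)
  else k
termination_by show_order.length - k

-- single pass over the elements of heads, state = (out, k); sets built once before the loop.
def get_head_reorder_alt (heads : List String) (show_order : List String) : List String :=
  let present := PySem.Set.ofList heads
  let in_order := PySem.Set.ofList show_order
  (heads.foldl
      (fun (st : List String × Nat) h =>
        if in_order.contains h then
          let k := skipB present show_order st.2
          (st.1 ++ [show_order.getD k ""], k + 1)
        else (st.1 ++ [h], st.2))
      (([] : List String), 0)).1

-- ===== PRECONDITION & SPEC =====
-- Pre_ excludes exactly the inputs where Python A raises IndexError on show_order[i]: when more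
-- positions of heads match show_order than there are entries of show_order matching heads
-- (possible only with duplicates in heads). B's Python raises IndexError there as well.
def Pre_get_head_reorder (heads : List String) (show_order : List String) : Prop :=
  (heads.filter (fun h => show_order.contains h)).length
    ≤ (show_order.filter (fun x => heads.contains x)).length
instance (heads : List String) (show_order : List String) : Decidable (Pre_get_head_reorder heads show_order) := by
  unfold Pre_get_head_reorder; infer_instance

def pvWitness_get_head_reorder : List String × List String := (["a", "b", "c"], ["c", "a"])

def Spec_get_head_reorder (heads : List String) (show_order : List String) (out : List String) : Prop := out = get_head_reorder_alt heads show_order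
instance (heads : List String) (show_order : List String) (out : List String) : Decidable (Spec_get_head_reorder heads show_order out) := by unfold Spec_get_head_reorder; infer_instance

-- ===== CLAIM (what is proved, stated in full; the proofs are below) =====
def Claim_equal_get_head_reorder : Prop := ∀ (heads : List String) (show_order : List String), Dom_get_head_reorder heads show_order → Pre_get_head_reorder heads show_order → Spec_get_head_reorder heads show_order (get_head_reorder heads show_order)

-- ===== LEMMAS AND PROOFS =====

-- the common value of both ports, A's reading: replace the matching elements by f.getD 0, 1, …
def specGo (f : List String) : List String → Nat → List String
  | [], _ => []
  | h :: t, j => if f.contains h then f.getD j "" :: specGo f t (j + 1) else h :: specGo f t j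

-- the common value, B's reading: consume the pending kept entries front to back
def go2 (so : List String) : List String → List String → List String
  | _, [] => []
  | pend, h :: t => if so.contains h then pend.headD "" :: go2 so pend.tail t else h :: go2 so pend t

-- the positions A's first loop collects
def cps (f : List String) (hs : List String) : List Nat :=
  (List.range hs.length).filter (fun i => f.contains (hs.getD i ""))

theorem cps_cons (f : List String) (h : String) (t : List String) :
    cps f (h :: t) = (if f.contains h then [0] else []) ++ (cps f t).map (· + 1) := by
  unfold cps
  simp only [List.length_cons]
  rw [List.range_succ_eq_map]
  by_cases hc : h ∈ f <;>
    (simp [hc, List.filter_map, Function.comp_def]; rfl)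

theorem getD_map_add_one (l : List Nat) (x : Nat) (hx : x < l.length) :
    (l.map (· + 1)).getD x 0 = l.getD x 0 + 1 := by
  rw [List.getD_eq_getElem?_getD, List.getElem?_map, List.getD_eq_getElem?_getD,
      List.getElem?_eq_getElem hx]
  simp

theorem A_loop (f : List String) :
    ∀ (hs pre : List String) (j : Nat),
      (List.range (cps f hs).length).foldl
        (fun acc k => acc.set (pre.length + (cps f hs).getD k 0) (f.getD (j + k) ""))
        (pre ++ hs)
      = pre ++ specGo f hs j := by
  intro hs
  induction hs with
  | nil => intro pre j; simp [cps, specGo]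
  | cons h t ih =>
    intro pre j
    by_cases hc : f.contains h = true
    · have hm : h ∈ f := by simpa using hc
      have hspec : specGo f (h :: t) j = f.getD j "" :: specGo f t (j + 1) := by
        simp [specGo, hm]
      rw [hspec, cps_cons, if_pos hc, List.singleton_append]
      simp only [List.length_cons, List.length_map]
      rw [List.range_succ_eq_map, List.foldl_cons, List.foldl_map]
      simp only [List.getD_cons_zero, Nat.add_zero]
      rw [List.set_append_right _ _ (Nat.le_refl _), Nat.sub_self, List.set_cons_zero]
      have hinit : pre ++ f.getD j "" :: t = (pre ++ [f.getD j ""]) ++ t := by simp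
      rw [hinit]
      rw [PySem.List.foldl_congr_mem (List.range (cps f t).length) _
            (fun acc k => acc.set ((pre ++ [f.getD j ""]).length + (cps f t).getD k 0)
              (f.getD ((j + 1) + k) ""))
            ((pre ++ [f.getD j ""]) ++ t)
            (by
              intro acc x hx
              have hx' : x < (cps f t).length := List.mem_range.mp hx
              simp only [Nat.succ_eq_add_one, List.getD_cons_succ,
                getD_map_add_one _ _ hx', List.length_append, List.length_cons,
                List.length_nil]
              congr 1
              · omega
              · congr 1; omega)]
      rw [ih]
      simp
    · have hm : h ∉ f := by simpa using hc
      have hspec : specGo f (h :: t) j = h :: specGo f t j := by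
        simp [specGo, hm]
      rw [hspec, cps_cons, if_neg hc, List.nil_append]
      simp only [List.length_map]
      have hinit : pre ++ h :: t = (pre ++ [h]) ++ t := by simp
      rw [hinit]
      rw [PySem.List.foldl_congr_mem (List.range (cps f t).length) _
            (fun acc k => acc.set ((pre ++ [h]).length + (cps f t).getD k 0)
              (f.getD (j + k) ""))
            ((pre ++ [h]) ++ t)
            (by
              intro acc x hx
              have hx' : x < (cps f t).length := List.mem_range.mp hx
              simp only [getD_map_add_one _ _ hx', List.length_append, List.length_cons,
                List.length_nil]
              congr 1
              omega)]
      rw [ih]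
      simp

-- (ofList xs).contains = xs.contains
theorem setContains_ofList (xs : List String) (y : String) :
    (PySem.Set.ofList xs).contains y = xs.contains y := by
  by_cases h : y ∈ xs
  · have h1 : (PySem.Set.ofList xs).contains y = true := by
      rw [PySem.Set.contains_iff]; exact (PySem.Set.mem_ofList _ _).mpr h
    have h2 : xs.contains y = true := by simpa using h
    rw [h1, h2]
  · have h1 : ¬ (PySem.Set.ofList xs).contains y = true := by
      rw [PySem.Set.contains_iff, PySem.Set.mem_ofList]; exact h
    have h2 : ¬ xs.contains y = true := by simpa using h
    rw [Bool.not_eq_true] at h1 h2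
    rw [h1, h2]

theorem getD_eq_headD_drop (l : List String) (j : Nat) :
    l.getD j "" = (l.drop j).headD "" := by
  rw [List.getD_eq_getElem?_getD, List.headD_eq_head?_getD, List.head?_drop]

-- the cursor advance: skipB lands on the head of the pending kept entries
theorem skip_spec (heads show_order : List String) :
    ∀ (n k : Nat), show_order.length - k ≤ n →
      show_order.getD (skipB (PySem.Set.ofList heads) show_order k) ""
          = ((show_order.drop k).filter (fun x => heads.contains x)).headD ""
      ∧ (show_order.drop (skipB (PySem.Set.ofList heads) show_order k + 1)).filter
            (fun x => heads.contains x)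
          = ((show_order.drop k).filter (fun x => heads.contains x)).tail := by
  intro n
  induction n with
  | zero =>
    intro k hk
    have hdrop : show_order.drop k = [] := List.drop_eq_nil_of_le (by omega)
    rw [skipB, dif_neg (by omega)]
    refine ⟨?_, ?_⟩
    · rw [List.getD_eq_getElem?_getD, List.getElem?_eq_none (by omega), hdrop]; rfl
    · rw [List.drop_eq_nil_of_le (by omega), hdrop]; rfl
  | succ n ih =>
    intro k hk
    by_cases hlt : k < show_order.length
    · have hdrop : show_order.drop k = show_order[k] :: show_order.drop (k + 1) :=
        List.drop_eq_getElem_cons hlt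
      have hgetD : show_order.getD k "" = show_order[k] := by
        rw [List.getD_eq_getElem?_getD, List.getElem?_eq_getElem hlt]; rfl
      by_cases hp : heads.contains show_order[k] = true
      · rw [skipB, dif_pos hlt, if_pos (by rw [setContains_ofList, hgetD]; exact hp)]
        have hfil : (show_order.drop k).filter (fun x => heads.contains x)
            = show_order[k] :: (show_order.drop (k + 1)).filter (fun x => heads.contains x) := by
          rw [hdrop, List.filter_cons_of_pos hp]
        rw [hfil, hgetD]
        exact ⟨rfl, rfl⟩
      · rw [skipB, dif_pos hlt, if_neg (by rw [setContains_ofList, hgetD]; exact hp)]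
        have hfil : (show_order.drop k).filter (fun x => heads.contains x)
            = (show_order.drop (k + 1)).filter (fun x => heads.contains x) := by
          rw [hdrop, List.filter_cons_of_neg (by simpa using hp)]
        rw [hfil]
        exact ih (k + 1) (by omega)
    · have hdrop : show_order.drop k = [] := List.drop_eq_nil_of_le (by omega)
      rw [skipB, dif_neg hlt]
      refine ⟨?_, ?_⟩
      · rw [List.getD_eq_getElem?_getD, List.getElem?_eq_none (by omega), hdrop]; rfl
      · rw [List.drop_eq_nil_of_le (by omega), hdrop]; rfl

-- B's fold computes go2 over the pending kept entries
theorem B_loop (heads show_order : List String) :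
    ∀ (hs acc : List String) (k : Nat),
      (hs.foldl
        (fun (st : List String × Nat) h =>
          if (PySem.Set.ofList show_order).contains h then
            let k' := skipB (PySem.Set.ofList heads) show_order st.2
            (st.1 ++ [show_order.getD k' ""], k' + 1)
          else (st.1 ++ [h], st.2)) (acc, k)).1
      = acc ++ go2 show_order ((show_order.drop k).filter (fun x => heads.contains x)) hs := by
  intro hs
  induction hs with
  | nil => intro acc k; simp [go2]
  | cons h t ih =>
    intro acc k
    simp only [List.foldl_cons]
    by_cases hc : show_order.contains h = true
    · rw [if_pos (by rw [setContains_ofList]; exact hc)]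
      obtain ⟨h1, h2⟩ := skip_spec heads show_order (show_order.length - k) k (Nat.le_refl _)
      rw [ih, h1, h2]
      have hgo : go2 show_order ((show_order.drop k).filter (fun x => heads.contains x)) (h :: t)
          = ((show_order.drop k).filter (fun x => heads.contains x)).headD ""
            :: go2 show_order ((show_order.drop k).filter (fun x => heads.contains x)).tail t := by
        simp only [go2]; rw [if_pos hc]
      rw [hgo]
      simp
    · rw [if_neg (by rw [setContains_ofList]; exact hc)]
      rw [ih]
      have hgo : go2 show_order ((show_order.drop k).filter (fun x => heads.contains x)) (h :: t)
          = h :: go2 show_order ((show_order.drop k).filter (fun x => heads.contains x)) t := by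
        simp only [go2]; rw [if_neg hc]
      rw [hgo]
      simp

-- A's reading equals B's reading when every scanned element comes from heads
theorem specGo_eq_go2 (heads show_order : List String) :
    ∀ (hs : List String), (∀ h ∈ hs, h ∈ heads) → ∀ (j : Nat),
      specGo (show_order.filter (fun x => heads.contains x)) hs j
        = go2 show_order ((show_order.filter (fun x => heads.contains x)).drop j) hs := by
  intro hs
  induction hs with
  | nil => intro _ j; simp [specGo, go2]
  | cons h t ih =>
    intro hsub j
    have hh : h ∈ heads := hsub h (List.mem_cons_self ..)
    have ht : ∀ x ∈ t, x ∈ heads := fun x hx => hsub x (List.mem_cons_of_mem _ hx)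
    have hcond : (show_order.filter (fun x => heads.contains x)).contains h
        = show_order.contains h := by
      by_cases hso : h ∈ show_order <;> simp [hso, hh]
    by_cases hc : show_order.contains h = true
    · have : specGo (show_order.filter (fun x => heads.contains x)) (h :: t) j
          = (show_order.filter (fun x => heads.contains x)).getD j ""
            :: specGo (show_order.filter (fun x => heads.contains x)) t (j + 1) := by
        simp only [specGo]; rw [if_pos (by rw [hcond]; exact hc)]
      rw [this, ih ht (j + 1), getD_eq_headD_drop]
      have hgo : go2 show_order ((show_order.filter (fun x => heads.contains x)).drop j) (h :: t)
          = ((show_order.filter (fun x => heads.contains x)).drop j).headD ""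
            :: go2 show_order (((show_order.filter (fun x => heads.contains x)).drop j)).tail t := by
        simp only [go2]; rw [if_pos hc]
      rw [hgo, List.tail_drop]
    · have : specGo (show_order.filter (fun x => heads.contains x)) (h :: t) j
          = h :: specGo (show_order.filter (fun x => heads.contains x)) t j := by
        simp only [specGo]; rw [if_neg (by rw [hcond]; exact hc)]
      rw [this, ih ht j]
      have hgo : go2 show_order ((show_order.filter (fun x => heads.contains x)).drop j) (h :: t)
          = h :: go2 show_order ((show_order.filter (fun x => heads.contains x)).drop j) t := by
        simp only [go2]; rw [if_neg hc]
      rw [hgo]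

-- the two ports agree on every input (the Pre_ hypothesis marks where the PYTHONS return at all)
theorem ports_eq (heads show_order : List String) :
    get_head_reorder heads show_order = get_head_reorder_alt heads show_order := by
  unfold get_head_reorder get_head_reorder_alt
  dsimp only []
  have hfold := PySem.List.foldl_append_if
        (fun i => (List.filter (fun x => heads.contains x) show_order).contains (heads.getD i ""))
        (fun i : Nat => i) (List.range heads.length) ([] : List Nat)
  simp only [List.nil_append, List.map_id'] at hfold
  rw [hfold]
  have hA := A_loop (show_order.filter (fun x => heads.contains x)) heads [] 0
  simp only [cps, List.length_nil, Nat.zero_add, List.nil_append] at hA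
  rw [hA]
  have hB := B_loop heads show_order heads [] 0
  simp only [List.drop_zero, List.nil_append] at hB
  rw [hB]
  exact specGo_eq_go2 heads show_order heads (fun _ hx => hx) 0

-- ===== VERDICT (by name: the statement is the Claim_ definition above) =====
theorem get_head_reorder_spec : Claim_equal_get_head_reorder := by
  intro heads show_order _ _
  unfold Spec_get_head_reorder
  exact ports_eq heads show_order
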